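-- pv_equiv track=rewrite | github.com/AyuubMohamud/TileLinkIP | rtl/interconnect/genEncMpx.py | genEncMultiplexer
-- ===== SOURCE A (Python) =====
-- def genEncMultiplexer(caseExpr: str, caseNum: int, output: str, input: str, bxtrct: int, default_val : str) -> str:
--     text = ""
--     text += f"""\talways_comb begin\n\t\tcasez ({caseExpr})"""
--     comp_bitvec = []
--     for x in range(0, caseNum):
--         comp_bitvec.append('z')
--     for x in range(0, caseNum):
--         comp_bitvec[caseNum-x-1] = '1'
--         for y in range (caseNum-x, caseNum):
--             comp_bitvec[y] = '0'
--         bitvec = "".join(comp_bitvec)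
--         text += f"\n\t\t\t{caseNum}'b{bitvec}: {output} = {input}[{(x+1)*bxtrct-1}:{(x)*bxtrct}];"
--     text+=f"\n\t\t\tdefault: {output} = {default_val};\n\t\tendcase\n\tend"
--     return text
-- ===== SOURCE B (Python) =====
-- def genEncMultiplexer(caseExpr: str, caseNum: int, output: str, input: str, bxtrct: int, default_val : str) -> str:
--     rows = "".join(
--         f"\n\t\t\t{caseNum}'b{'z' * (caseNum - x - 1)}1{'0' * x}: {output} = {input}[{(x + 1) * bxtrct - 1}:{x * bxtrct}];"
--         for x in range(caseNum)
--     )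
--     return (f"\talways_comb begin\n\t\tcasez ({caseExpr})"
--             + rows
--             + f"\n\t\t\tdefault: {output} = {default_val};\n\t\tendcase\n\tend")
-- ===== Notes on version B (the rewrite author's own statement) =====
-- stated objective: simpler
-- what changed: Replaced A's shared mutable comp_bitvec list (built by an append loop and rewritten in place by a nested zeroing loop each iteration) with a single pass that builds every row's pattern directly in closed form as 'z'*(caseNum-x-1)+'1'+'0'*x and joins the rows.
import Mathlib
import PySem

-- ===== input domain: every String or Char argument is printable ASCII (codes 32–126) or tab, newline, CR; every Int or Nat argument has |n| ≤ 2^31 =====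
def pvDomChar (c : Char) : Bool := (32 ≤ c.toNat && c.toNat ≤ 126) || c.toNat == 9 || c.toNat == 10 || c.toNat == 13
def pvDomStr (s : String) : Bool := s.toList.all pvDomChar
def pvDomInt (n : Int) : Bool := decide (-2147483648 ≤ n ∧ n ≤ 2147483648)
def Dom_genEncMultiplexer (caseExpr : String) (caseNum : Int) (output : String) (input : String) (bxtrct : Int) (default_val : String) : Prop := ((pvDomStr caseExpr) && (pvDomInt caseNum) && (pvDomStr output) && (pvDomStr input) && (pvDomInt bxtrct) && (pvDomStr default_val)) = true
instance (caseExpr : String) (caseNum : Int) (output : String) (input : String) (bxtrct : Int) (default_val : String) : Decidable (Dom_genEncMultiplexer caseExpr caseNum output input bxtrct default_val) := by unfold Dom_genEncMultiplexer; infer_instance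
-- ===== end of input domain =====

-- B replaces A's mutable comp_bitvec list and its nested zeroing loop by a closed-form
-- per-row pattern 'z'*(caseNum-x-1) + '1' + '0'*x built in one pass (objective: simpler).

-- ===== PORT A =====
-- loop body of A's main 'for x in range(0, caseNum)' loop: state = (comp_bitvec, text)
def pvStepA (caseNum : Int) (output : String) (input : String) (bxtrct : Int)
    (st : List Char × String) (x : Int) : List Char × String :=
  -- comp_bitvec[caseNum-x-1] = '1'   (the index is ≥ 0 whenever the loop runs, so .toNat is exact)
  let cb1 := st.1.set (caseNum - x - 1).toNat '1'
  -- for y in range(caseNum-x, caseNum): comp_bitvec[y] = '0'   (y ≥ 0 in the loop, .toNat exact)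
  let cb2 := (PySem.List.pyRange (caseNum - x) caseNum 1).foldl (fun cb y => cb.set y.toNat '0') cb1
  -- bitvec = "".join(comp_bitvec) → String.ofList (join of one-char strings is the chars themselves)
  (cb2, st.2 ++ "\n\t\t\t" ++ PySem.Int.toStr caseNum ++ "'b" ++ String.ofList cb2 ++ ": " ++ output
      ++ " = " ++ input ++ "[" ++ PySem.Int.toStr ((x + 1) * bxtrct - 1) ++ ":"
      ++ PySem.Int.toStr (x * bxtrct) ++ "];")

def genEncMultiplexer (caseExpr : String) (caseNum : Int) (output : String) (input : String) (bxtrct : Int) (default_val : String) : String :=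
  let text : String := ""
  let text := text ++ "\talways_comb begin\n\t\tcasez (" ++ caseExpr ++ ")"
  -- for x in range(0, caseNum): comp_bitvec.append('z')
  let comp_bitvec : List Char := (PySem.List.pyRange 0 caseNum 1).foldl (fun cb _ => cb ++ ['z']) []
  let st := (PySem.List.pyRange 0 caseNum 1).foldl (pvStepA caseNum output input bxtrct) (comp_bitvec, text)
  st.2 ++ "\n\t\t\tdefault: " ++ output ++ " = " ++ default_val ++ ";\n\t\tendcase\n\tend"

-- ===== PORT B =====
-- one row of the casez table, its pattern built in closed form: 'z'*(caseNum-x-1) + '1' + '0'*x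
def pvRowB (caseNum : Int) (output : String) (input : String) (bxtrct : Int) (x : Int) : String :=
  "\n\t\t\t" ++ PySem.Int.toStr caseNum ++ "'b" ++ String.ofList (List.replicate (caseNum - x - 1).toNat 'z')
    ++ "1" ++ String.ofList (List.replicate x.toNat '0') ++ ": " ++ output ++ " = " ++ input
    ++ "[" ++ PySem.Int.toStr ((x + 1) * bxtrct - 1) ++ ":" ++ PySem.Int.toStr (x * bxtrct) ++ "];"

def genEncMultiplexer_alt (caseExpr : String) (caseNum : Int) (output : String) (input : String) (bxtrct : Int) (default_val : String) : String :=
  -- rows = "".join(row for x in range(caseNum)) — an empty-separator join is plain concatenation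
  let rows := ((PySem.List.pyRange 0 caseNum 1).map (pvRowB caseNum output input bxtrct)).foldl (· ++ ·) ""
  "\talways_comb begin\n\t\tcasez (" ++ caseExpr ++ ")" ++ rows
    ++ "\n\t\t\tdefault: " ++ output ++ " = " ++ default_val ++ ";\n\t\tendcase\n\tend"

-- ===== PRECONDITION & SPEC =====
def Spec_genEncMultiplexer (caseExpr : String) (caseNum : Int) (output : String) (input : String) (bxtrct : Int) (default_val : String) (out : String) : Prop := out = genEncMultiplexer_alt caseExpr caseNum output input bxtrct default_val
instance (caseExpr : String) (caseNum : Int) (output : String) (input : String) (bxtrct : Int) (default_val : String) (out : String) : Decidable (Spec_genEncMultiplexer caseExpr caseNum output input bxtrct default_val out) := by unfold Spec_genEncMultiplexer; infer_instance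

-- ===== CLAIM (what is proved, stated in full; the proofs are below) =====
def Claim_equal_genEncMultiplexer : Prop := ∀ (caseExpr : String) (caseNum : Int) (output : String) (input : String) (bxtrct : Int) (default_val : String), Dom_genEncMultiplexer caseExpr caseNum output input bxtrct default_val → Spec_genEncMultiplexer caseExpr caseNum output input bxtrct default_val (genEncMultiplexer caseExpr caseNum output input bxtrct default_val)

-- ===== LEMMAS AND PROOFS =====

-- A's append loop builds the all-'z' list
lemma pv_init_z (n : Int) :
    (PySem.List.pyRange 0 n 1).foldl (fun cb _ => cb ++ ['z']) ([] : List Char)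
      = List.replicate n.toNat 'z' := by
  rw [PySem.List.foldl_append_singleton_eq_map]
  simp [List.map_const', PySem.List.length_pyRange_one]

-- taking one past a left factor of known length
lemma pv_take_succ {α : Type} (A : List α) (c : α) (rest : List α) :
    (A ++ c :: rest).take (A.length + 1) = A ++ [c] := by
  induction A with
  | nil => simp
  | cons a A ih => simp [ih]

-- A's inner zeroing loop, in closed form
lemma pv_zero_fill (n : Int) : ∀ (k : Nat) (b : Int) (L : List Char), 0 ≤ b → (n - b).toNat = k →
    L.length = n.toNat →
    (PySem.List.pyRange b n 1).foldl (fun cb y => cb.set y.toNat '0') L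
      = L.take b.toNat ++ List.replicate k '0' := by
  intro k
  induction k with
  | zero =>
      intro b L hb hk hL
      rw [PySem.List.pyRange_one_eq_nil (by omega)]
      have hle : L.length ≤ b.toNat := by omega
      simp [List.take_of_length_le hle]
  | succ k ih =>
      intro b L hb hk hL
      rw [PySem.List.pyRange_one_cons (by omega)]
      simp only [List.foldl_cons]
      rw [ih (b + 1) (L.set b.toNat '0') (by omega) (by omega) (by simpa using hL)]
      have hbl : b.toNat < L.length := by omega
      rw [List.set_eq_take_append_cons_drop, if_pos hbl]
      have h1 : (b + 1).toNat = b.toNat + 1 := by omega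
      have hlen : (L.take b.toNat).length = b.toNat := by simp; omega
      have h2 := pv_take_succ (L.take b.toNat) '0' (L.drop (b.toNat + 1))
      rw [hlen] at h2
      rw [h1, h2]
      simp [List.replicate_succ]

-- one iteration of A's outer loop rewrites comp_bitvec to the closed-form row pattern
lemma pv_step_bitvec (n a : Int) (cb : List Char) (ha : 0 ≤ a) (han : a < n)
    (hL : cb.length = n.toNat) (hz : ∀ i, i < (n - a).toNat → cb[i]? = some 'z') :
    (PySem.List.pyRange (n - a) n 1).foldl (fun cb y => cb.set y.toNat '0')
        (cb.set (n - a - 1).toNat '1')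
      = List.replicate (n - a - 1).toNat 'z' ++ '1' :: List.replicate a.toNat '0' := by
  rw [pv_zero_fill n a.toNat (n - a) _ (by omega) (by omega) (by simpa using hL)]
  have hset : ((cb.set (n - a - 1).toNat '1').take (n - a).toNat)
      = List.replicate (n - a - 1).toNat 'z' ++ ['1'] := by
    apply List.ext_getElem
    · simp; omega
    · intro i h1 h2
      have hi : i < (n - a).toNat := by simp at h1; omega
      have hicb : i < cb.length := by omega
      rw [List.getElem_take, List.getElem_append]
      split
      · rename_i hlt
        simp only [List.length_replicate] at hlt
        rw [List.getElem_set_ne (by omega)]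
        have hv : cb[i] = 'z' := by
          have h3 := hz i hi
          rw [List.getElem?_eq_getElem hicb] at h3
          exact Option.some.inj h3
        simp [hv]
      · rename_i hge
        simp only [List.length_replicate, Nat.not_lt] at hge
        have hieq : i = (n - a - 1).toNat := by omega
        subst hieq
        rw [List.getElem_set_self]
        simp
  rw [hset]
  simp

-- the outer loop's text accumulator equals the concatenation of B's rows
lemma pv_loop (n : Int) (output input : String) (bxtrct : Int) :
    ∀ (k : Nat) (a : Int) (cb : List Char) (t : String), 0 ≤ a → (n - a).toNat = k →
    cb.length = n.toNat → (∀ i, i < (n - a).toNat → cb[i]? = some 'z') →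
    ((PySem.List.pyRange a n 1).foldl (pvStepA n output input bxtrct) (cb, t)).2.toList
      = t.toList ++ ((PySem.List.pyRange a n 1).map
          (fun x => (pvRowB n output input bxtrct x).toList)).flatten := by
  intro k
  induction k with
  | zero =>
      intro a cb t ha hk hL hz
      rw [PySem.List.pyRange_one_eq_nil (by omega)]
      simp
  | succ k ih =>
      intro a cb t ha hk hL hz
      rw [PySem.List.pyRange_one_cons (by omega)]
      simp only [List.foldl_cons, List.map_cons, List.flatten_cons]
      have hcb2 := pv_step_bitvec n a cb ha (by omega) hL hz
      show ((PySem.List.pyRange (a + 1) n 1).foldl (pvStepA n output input bxtrct)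
          (pvStepA n output input bxtrct (cb, t) a)).2.toList = _
      rw [show pvStepA n output input bxtrct (cb, t) a
          = (List.replicate (n - a - 1).toNat 'z' ++ '1' :: List.replicate a.toNat '0',
             t ++ "\n\t\t\t" ++ PySem.Int.toStr n ++ "'b"
               ++ String.ofList (List.replicate (n - a - 1).toNat 'z' ++ '1' :: List.replicate a.toNat '0')
               ++ ": " ++ output ++ " = " ++ input ++ "[" ++ PySem.Int.toStr ((a + 1) * bxtrct - 1)
               ++ ":" ++ PySem.Int.toStr (a * bxtrct) ++ "];") from by
        simp only [pvStepA]; rw [hcb2]]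
      rw [ih (a + 1) _ _ (by omega) (by omega) (by simp; omega)
        (by intro i hi
            have hi' : i < (n - a - 1).toNat := by omega
            rw [List.getElem?_append_left (by simpa using hi')]
            have hi2 : i < (n - a).toNat - 1 := by omega
            simp [hi2])]
      simp [pvRowB]
  
lemma pv_foldl_append_toList (l : List String) : ∀ s : String,
    (l.foldl (· ++ ·) s).toList = s.toList ++ (l.map String.toList).flatten := by
  induction l with
  | nil => intro s; simp
  | cons h t ih => intro s; rw [List.foldl_cons, ih]; simp

-- ===== VERDICT (by name: the statement is the Claim_ definition above) =====
theorem genEncMultiplexer_spec : Claim_equal_genEncMultiplexer := by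
  intro caseExpr caseNum output input bxtrct default_val _
  unfold Spec_genEncMultiplexer genEncMultiplexer genEncMultiplexer_alt
  apply String.ext
  by_cases hn : 0 ≤ caseNum
  · rw [pv_init_z]
    have hmain := pv_loop caseNum output input bxtrct caseNum.toNat 0
      (List.replicate caseNum.toNat 'z')
      ("" ++ "\talways_comb begin\n\t\tcasez (" ++ caseExpr ++ ")")
      le_rfl (by omega) (by simp)
      (by intro i hi
          have hi2 : i < caseNum.toNat := by omega
          simp [hi2])
    simp only [String.toList_append]
    rw [hmain]
    simp [pv_foldl_append_toList, Function.comp_def]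
  · rw [PySem.List.pyRange_one_eq_nil (by omega)]
    simp
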